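-- pv_equiv track=rewrite | github.com/Ledugus/Advent_of_Code | 2023/14_solution.py | cascade
-- ===== SOURCE A (Python) =====
-- def cascade(row):
--     for index in range(len(row)):
--         if row[index] != "O":
--             continue
--         new_index = index - 1
--         while new_index >= 0 and row[new_index] not in ["O", "#"]:
--             new_index -= 1
--         row[index] = "."
--         row[new_index+1] = "O"
--
--     return row
-- ===== SOURCE B (Python) =====
-- def cascade(row):
--     # Single pass: `free` is the slot just after the last blocker ("O" or "#").
--     # Mutates `row` in place like the original and returns it.
--     free = 0
--     for i in range(len(row)):
--         cell = row[i]
--         if cell == "O":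
--             row[i] = "."
--             row[free] = "O"
--             free += 1
--         elif cell == "#":
--             free = i + 1
--     return row
-- ===== Notes on version B (the rewrite author's own statement) =====
-- stated objective: alternative
-- what changed: Replaced the per-rock backward while-scan for the nearest blocker with a single left-to-right pass that maintains the next free slot (reset after each '#', advanced after each placed 'O'); same cost on the measured inputs.
import Mathlib
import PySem

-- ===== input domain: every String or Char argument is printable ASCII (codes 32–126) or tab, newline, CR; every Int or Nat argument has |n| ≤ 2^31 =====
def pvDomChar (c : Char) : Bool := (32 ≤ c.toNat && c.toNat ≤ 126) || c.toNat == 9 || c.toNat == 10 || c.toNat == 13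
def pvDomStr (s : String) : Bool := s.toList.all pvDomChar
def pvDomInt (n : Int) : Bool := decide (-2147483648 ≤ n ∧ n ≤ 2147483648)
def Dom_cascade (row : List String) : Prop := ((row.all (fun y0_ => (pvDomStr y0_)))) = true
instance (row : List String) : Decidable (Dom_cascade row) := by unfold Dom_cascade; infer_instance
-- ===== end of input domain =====

-- B replaces A's per-'O' backward scan with a single left-to-right pass tracking the next free slot.
-- Both Pythons mutate `row` in place identically; the theorems are about the returned value.

-- ===== PORT A =====
-- A's inner `while new_index >= 0 and row[new_index] not in ["O","#"]` loop, started at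
-- new_index = index-1; argument n stands for new_index+1, the returned value is the final
-- new_index+1.  All reads are in range in Python, so getD is exact here.
def cascadeWhile (row : List String) : Nat → Nat
  | 0 => 0
  | n+1 => if row.getD n "" = "O" ∨ row.getD n "" = "#" then n+1 else cascadeWhile row n

def cascade (row : List String) : List String :=
  (List.range row.length).foldl (fun cur index =>
    if cur.getD index "" ≠ "O" then cur
    else (cur.set index ".").set (cascadeWhile cur index) "O") row

-- ===== PORT B =====
def cascade_alt (row : List String) : List String :=
  ((List.range row.length).foldl (fun (s : List String × Nat) i =>
      let cell := s.1.getD i ""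
      if cell = "O" then ((s.1.set i ".").set s.2 "O", s.2 + 1)
      else if cell = "#" then (s.1, i + 1)
      else s) (row, 0)).1

-- ===== PRECONDITION & SPEC =====
def Spec_cascade (row : List String) (out : List String) : Prop := out = cascade_alt row
instance (row : List String) (out : List String) : Decidable (Spec_cascade row out) := by unfold Spec_cascade; infer_instance

-- ===== CLAIM (what is proved, stated in full; the proofs are below) =====
def Claim_equal_cascade : Prop := ∀ (row : List String), Dom_cascade row → Spec_cascade row (cascade row)

-- ===== LEMMAS AND PROOFS =====

theorem cascadeWhile_le (row : List String) (k : Nat) : cascadeWhile row k ≤ k := by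
  induction k with
  | zero => simp [cascadeWhile]
  | succ n ih =>
    simp only [cascadeWhile]
    split
    · exact le_refl _
    · exact Nat.le_succ_of_le ih

-- if row has an "O" at f and only non-blockers strictly between f and k, the scan stops at f
theorem cascadeWhile_stop (row : List String) (f k : Nat) (hf : f < k)
    (hO : row.getD f "" = "O")
    (hmid : ∀ j, f < j → j < k → ¬(row.getD j "" = "O" ∨ row.getD j "" = "#")) :
    cascadeWhile row k = f + 1 := by
  induction k with
  | zero => omega
  | succ n ih =>
    simp only [cascadeWhile]
    by_cases hfn : f = n
    · subst hfn; rw [if_pos (Or.inl hO)]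
    · have hfn' : f < n := by omega
      have hnb : ¬(row.getD n "" = "O" ∨ row.getD n "" = "#") :=
        hmid n hfn' (Nat.lt_succ_self n)
      rw [if_neg hnb]
      exact ih hfn' (fun j hj1 hj2 => hmid j hj1 (Nat.lt_succ_of_lt hj2))

-- everything from the scan's stopping point up to k is a non-blocker
theorem cascadeWhile_mid (row : List String) (k : Nat) :
    ∀ j, cascadeWhile row k ≤ j → j < k → ¬(row.getD j "" = "O" ∨ row.getD j "" = "#") := by
  induction k with
  | zero => omega
  | succ n ih =>
    intro j hj1 hj2
    simp only [cascadeWhile] at hj1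
    by_cases hb : row.getD n "" = "O" ∨ row.getD n "" = "#"
    · rw [if_pos hb] at hj1; omega
    · rw [if_neg hb] at hj1
      by_cases hjn : j = n
      · subst hjn; exact hb
      · exact ih j hj1 (by omega)

-- the main loop invariant: starting both folds at index k with common row `cur` and
-- B's free slot equal to A's scan result at k, the folds stay equal
theorem cascade_inv (m : Nat) : ∀ (k : Nat) (cur : List String) (free : Nat),
    free = cascadeWhile cur k →
    (List.range' k m).foldl (fun cur index =>
      if cur.getD index "" ≠ "O" then cur
      else (cur.set index ".").set (cascadeWhile cur index) "O") cur
    = ((List.range' k m).foldl (fun (s : List String × Nat) i =>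
        let cell := s.1.getD i ""
        if cell = "O" then ((s.1.set i ".").set s.2 "O", s.2 + 1)
        else if cell = "#" then (s.1, i + 1)
        else s) (cur, free)).1 := by
  induction m with
  | zero => intro k cur free _; simp [List.range']
  | succ m ih =>
    intro k cur free hfree
    rw [List.range'_succ]
    by_cases hO : cur.getD k "" = "O"
    · -- an 'O' at k: both sides move it to `free` and blank k
      have hkl : k < cur.length := by
        by_contra h
        rw [List.getD_eq_default _ _ (by omega)] at hO
        exact absurd hO (by decide)
      have hfk : free ≤ k := hfree ▸ cascadeWhile_le cur k
      set cur' := (cur.set k ".").set free "O" with hcur'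
      simp only [List.foldl_cons]
      rw [if_neg (not_not_intro hO), if_pos hO, ← hfree]
      apply ih
      -- new free = free+1 is where the scan from k+1 stops on cur'
      have hO' : cur'.getD free "" = "O" := by
        rw [hcur']
        rcases Nat.lt_or_ge free cur.length with hfl | hfl
        · rw [List.getD_eq_getElem?_getD, List.getElem?_set_self (by simpa using hfl)]
          simp
        · omega
      have hmid' : ∀ j, free < j → j < k + 1 → ¬(cur'.getD j "" = "O" ∨ cur'.getD j "" = "#") := by
        intro j hj1 hj2
        by_cases hjk : j = k
        · subst hjk
          have : cur'.getD j "" = "." := by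
            rw [hcur', List.getD_eq_getElem?_getD, List.getElem?_set_ne (by omega),
              List.getElem?_set_self (by simpa using hkl)]
            simp
          rw [List.getD_eq_getElem?_getD] at this
          simp [this]
        · have hjk' : j < k := by omega
          have : cur'.getD j "" = cur.getD j "" := by
            rw [hcur', List.getD_eq_getElem?_getD, List.getElem?_set_ne (by omega),
              List.getElem?_set_ne (by omega), ← List.getD_eq_getElem?_getD]
          rw [this]
          exact cascadeWhile_mid cur k j (by omega) hjk'
      exact (cascadeWhile_stop cur' free (k+1) (by omega) hO' hmid').symm
    · -- no 'O' at k: row unchanged; free follows the '#' rule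
      simp only [List.foldl_cons]
      rw [if_pos hO]
      by_cases hH : cur.getD k "" = "#"
      · rw [if_neg hO, if_pos hH]
        apply ih
        simp only [cascadeWhile]
        rw [if_pos (Or.inr hH)]
      · rw [if_neg hO, if_neg hH]
        apply ih
        simp only [cascadeWhile]
        rw [if_neg (by tauto)]
        exact hfree

-- ===== VERDICT (by name: the statement is the Claim_ definition above) =====
theorem cascade_spec : Claim_equal_cascade := by
  intro row _
  show cascade row = cascade_alt row
  unfold cascade cascade_alt
  rw [List.range_eq_range']
  exact cascade_inv row.length 0 row 0 rfl
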